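-- pv_equiv track=rewrite | github.com/HexedCoder/Advent-of-Code | 2024/Day22/solution.py | generate_secret
-- ===== SOURCE A (Python) =====
-- def generate_secret(secret, secret_series, sequence=None):
--     steps = 2000
--     initial_val = secret
--
--     curr_series = ""
--     curr_results = ""
--     if sequence:
--         seq_idx = 0
--         stored_val = None
--
--     while steps > 0:
--         secret = (secret ^ (secret * 64)) % 16777216
--         secret = (secret ^ (secret // 32)) % 16777216
--         secret = (secret ^ (secret * 2048)) % 16777216
--         saved_val = int(str(secret)[-1]) - int(str(initial_val)[-1])
--         if sequence:
--             if saved_val == sequence[seq_idx]: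
--                 if not stored_val:
--                     stored_val = saved_val
--                 seq_idx += 1
--                 if seq_idx == len(sequence):
--                     return int(str(secret)[-1])
--             else:
--                 seq_idx = 0
--                 stored_val = None
--
--         curr_series = f"{curr_series} {saved_val}"
--         curr_results = f"{curr_results} {int(str(secret)[-1])}"
--         initial_val = secret
--         steps -= 1
--
--     if not sequence:
--         secret_series.append((curr_series[1:], curr_results[1:]))
--         return secret
--     else:
--         return 0
-- ===== SOURCE B (Python) =====
-- def generate_secret(secret, secret_series, sequence=None):
--     prev = secret
--     pairs = []
--     for _ in range(2000):
--         secret = (secret ^ (secret * 64)) % 16777216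
--         secret = (secret ^ (secret // 32)) % 16777216
--         secret = (secret ^ (secret * 2048)) % 16777216
--         digit = int(str(secret)[-1])
--         pairs.append((digit - int(str(prev)[-1]), digit))
--         prev = secret
--     if not sequence:
--         secret_series.append((" ".join(str(d) for d, _ in pairs),
--                               " ".join(str(x) for _, x in pairs)))
--         return secret
--     seq_idx = 0
--     for delta, digit in pairs:
--         if delta == sequence[seq_idx]:
--             seq_idx += 1
--             if seq_idx == len(sequence):
--                 return digit
--         else:
--             seq_idx = 0
--     return 0
-- ===== Notes on version B (the rewrite author's own statement) =====
-- stated objective: alternative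
-- what changed: B splits A's single stateful while-loop into two phases: one pass generating the list of (delta, last-digit) pairs and the final secret, then either a linear join of the collected columns (falsy sequence) or a separate reset-on-mismatch scan of the pair list (truthy sequence), instead of A's inline string accumulation and inline matching state.
import Mathlib
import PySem

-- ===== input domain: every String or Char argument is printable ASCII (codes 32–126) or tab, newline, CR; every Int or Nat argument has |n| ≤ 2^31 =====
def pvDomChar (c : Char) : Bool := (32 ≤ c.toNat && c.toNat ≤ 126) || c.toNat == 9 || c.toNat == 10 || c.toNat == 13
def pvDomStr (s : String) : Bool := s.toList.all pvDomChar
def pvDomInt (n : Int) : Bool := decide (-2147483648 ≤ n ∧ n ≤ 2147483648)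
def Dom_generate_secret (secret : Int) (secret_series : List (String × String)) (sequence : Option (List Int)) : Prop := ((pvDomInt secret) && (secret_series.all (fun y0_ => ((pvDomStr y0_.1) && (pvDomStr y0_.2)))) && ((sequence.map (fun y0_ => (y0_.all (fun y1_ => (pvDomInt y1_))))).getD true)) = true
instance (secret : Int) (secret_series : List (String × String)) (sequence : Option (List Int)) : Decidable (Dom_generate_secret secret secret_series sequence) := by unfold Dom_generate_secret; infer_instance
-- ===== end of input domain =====

-- ===== PORT A =====
-- B is an alternative decomposition (generate the (delta,digit) pair list in one pass, then branch);
-- same asymptotic cost, different decomposition. Return-value equivalence only: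
-- A appends to secret_series in the falsy-sequence branch (B performs the same append in Python);
-- that in-place mutation is not modeled by these Int-valued ports.

-- shared transliterations of the expressions both Pythons contain verbatim:
-- the three-line secret transform, and int(str(n)[-1])
def pvNext (secret : Int) : Int :=
  let s1 := PySem.Int.mod (PySem.Int.bxor secret (secret * 64)) 16777216
  let s2 := PySem.Int.mod (PySem.Int.bxor s1 (PySem.Int.floordiv s1 32)) 16777216
  PySem.Int.mod (PySem.Int.bxor s2 (s2 * 2048)) 16777216

-- int(str(n)[-1]); str(n) is never empty and its last char is always a digit, so the
-- defaults are unreachable (exact on every Int)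
def pvLastDigit (n : Int) : Int :=
  match PySem.Str.pyGet? (PySem.Int.toStr n) (-1) with
  | some c => (PySem.Int.ofChars? [c]).getD 0
  | none => 0

-- Python truthiness of the `sequence` parameter (None and [] are falsy)
def pvTruthy (sequence : Option (List Int)) : Bool :=
  match sequence with
  | some (_ :: _) => true
  | _ => false

-- A's while-loop, fuel = steps; state exactly A's variables (strings carried although the
-- return value never reads them; the secret_series append is a side effect, see header)
def pvALoop : Nat → Int → Int → String → String → Option (List Int) → Nat → Option Int → Int
  | 0, secret, _, _, _, sequence, _, _ => if pvTruthy sequence then 0 else secret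
  | steps + 1, secret, initial_val, curr_series, curr_results, sequence, seq_idx, stored_val =>
    let secret' := pvNext secret
    let saved_val := pvLastDigit secret' - pvLastDigit initial_val
    if pvTruthy sequence then
      let seqL := sequence.getD []
      if PySem.List.pyGet? seqL (seq_idx : Int) = some saved_val then
        -- `if not stored_val` is truthy for None and for 0
        let stored_val' := if (match stored_val with | none => true | some v => v == 0)
                           then some saved_val else stored_val
        if seq_idx + 1 = seqL.length then pvLastDigit secret'
        else pvALoop steps secret' secret'
               (curr_series ++ " " ++ PySem.Int.toStr saved_val)
               (curr_results ++ " " ++ PySem.Int.toStr (pvLastDigit secret'))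
               sequence (seq_idx + 1) stored_val'
      else pvALoop steps secret' secret'
             (curr_series ++ " " ++ PySem.Int.toStr saved_val)
             (curr_results ++ " " ++ PySem.Int.toStr (pvLastDigit secret'))
             sequence 0 none
    else pvALoop steps secret' secret'
           (curr_series ++ " " ++ PySem.Int.toStr saved_val)
           (curr_results ++ " " ++ PySem.Int.toStr (pvLastDigit secret'))
           sequence seq_idx stored_val

def generate_secret (secret : Int) (secret_series : List (String × String)) (sequence : Option (List Int)) : Int :=
  pvALoop 2000 secret secret "" "" sequence 0 none

-- ===== PORT B =====
-- phase 1 of Source B: the 2000-step for-loop collecting (delta, digit) pairs; returns (pairs, final secret)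
def pvPairs : Nat → Int → Int → List (Int × Int) × Int
  | 0, secret, _ => ([], secret)
  | n + 1, secret, prev =>
    let s := pvNext secret
    let digit := pvLastDigit s
    let rest := pvPairs n s s
    ((digit - pvLastDigit prev, digit) :: rest.1, rest.2)

-- phase 2 of Source B: the reset-on-mismatch scan of the pair list
def pvScan (seq : List Int) : List (Int × Int) → Nat → Int
  | [], _ => 0
  | (delta, digit) :: rest, seq_idx =>
    if PySem.List.pyGet? seq (seq_idx : Int) = some delta then
      if seq_idx + 1 = seq.length then digit else pvScan seq rest (seq_idx + 1)
    else pvScan seq rest 0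

def generate_secret_alt (secret : Int) (secret_series : List (String × String)) (sequence : Option (List Int)) : Int :=
  let r := pvPairs 2000 secret secret
  if pvTruthy sequence then pvScan (sequence.getD []) r.1 0 else r.2

-- ===== PRECONDITION & SPEC =====
def Spec_generate_secret (secret : Int) (secret_series : List (String × String)) (sequence : Option (List Int)) (out : Int) : Prop := out = generate_secret_alt secret secret_series sequence
instance (secret : Int) (secret_series : List (String × String)) (sequence : Option (List Int)) (out : Int) : Decidable (Spec_generate_secret secret secret_series sequence out) := by unfold Spec_generate_secret; infer_instance

-- ===== CLAIM (what is proved, stated in full; the proofs are below) =====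
def Claim_equal_generate_secret : Prop := ∀ (secret : Int) (secret_series : List (String × String)) (sequence : Option (List Int)), Dom_generate_secret secret secret_series sequence → Spec_generate_secret secret secret_series sequence (generate_secret secret secret_series sequence)

-- ===== LEMMAS AND PROOFS =====


-- when sequence is falsy, A's loop never returns early and ends with the final secret
lemma pvALoop_falsy (sequence : Option (List Int)) (h : pvTruthy sequence = false) :
    ∀ (n : Nat) (s p : Int) (cs cr : String) (i : Nat) (sv : Option Int),
      pvALoop n s p cs cr sequence i sv = (pvPairs n s p).2 := by
  intro n
  induction n with
  | zero => intro s p cs cr i sv; simp [pvALoop, pvPairs, h]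
  | succ n ih => intro s p cs cr i sv; simp [pvALoop, pvPairs, h, ih]

-- when sequence is truthy, A's inline match/reset state machine equals B's scan of the pair list
lemma pvALoop_truthy (sequence : Option (List Int)) (h : pvTruthy sequence = true) :
    ∀ (n : Nat) (s p : Int) (cs cr : String) (i : Nat) (sv : Option Int),
      pvALoop n s p cs cr sequence i sv = pvScan (sequence.getD []) (pvPairs n s p).1 i := by
  intro n
  induction n with
  | zero => intro s p cs cr i sv; simp [pvALoop, pvPairs, pvScan, h]
  | succ n ih =>
    intro s p cs cr i sv
    simp only [pvALoop, pvPairs, pvScan, h, if_true]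
    split
    · split
      · rfl
      · exact ih _ _ _ _ _ _
    · exact ih _ _ _ _ _ _

-- ===== VERDICT (by name: the statement is the Claim_ definition above) =====
theorem generate_secret_spec : Claim_equal_generate_secret := by
  intro secret secret_series sequence _
  unfold Spec_generate_secret generate_secret generate_secret_alt
  cases h : pvTruthy sequence with
  | false => simp [pvALoop_falsy sequence h]
  | true => simp [pvALoop_truthy sequence h]
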